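-- pv_equiv track=rewrite | github.com/khulnasoft-lab/ai-assist | tests/codesuggestions/prompts/parsers/test_context.py | _highlight_position
-- ===== SOURCE A (Python) =====
-- def _highlight_position(pos, mystring):
--     # fix this quadratic loop
--     text_highlight = ""
--     for i, x in enumerate(mystring):
--         if i == pos:
--             text_highlight += f"\033[44;33m{x}\033[m"
--         else:
--             text_highlight += x
--     return text_highlight
-- ===== SOURCE B (Python) =====
-- def _highlight_position(pos, mystring):
--     if 0 <= pos < len(mystring):
--         return mystring[:pos] + f"\033[44;33m{mystring[pos]}\033[m" + mystring[pos + 1:]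
--     return mystring
-- ===== Notes on version B (the rewrite author's own statement) =====
-- stated objective: faster
-- what changed: Replaces the per-character enumerate loop with repeated string concatenation by a bounds check plus three constant-count slice/concat operations (prefix + highlighted char + suffix).
import Mathlib
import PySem

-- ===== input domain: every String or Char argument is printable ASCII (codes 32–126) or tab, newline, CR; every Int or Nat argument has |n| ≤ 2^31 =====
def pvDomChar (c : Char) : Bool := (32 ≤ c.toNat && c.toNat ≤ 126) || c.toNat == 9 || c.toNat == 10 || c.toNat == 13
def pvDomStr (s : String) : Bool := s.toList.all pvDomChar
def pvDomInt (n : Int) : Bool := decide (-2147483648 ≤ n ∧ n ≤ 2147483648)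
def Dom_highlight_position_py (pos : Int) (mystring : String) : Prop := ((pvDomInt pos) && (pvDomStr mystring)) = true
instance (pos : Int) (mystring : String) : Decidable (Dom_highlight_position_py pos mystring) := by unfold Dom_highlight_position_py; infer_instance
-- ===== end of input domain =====

-- B replaces A's per-character loop (quadratic string building) by a bounds check and three slices; return value only, no mutation.

-- ===== PORT A =====
-- highlight wrapper for one character: f"\033[44;33m{x}\033[m"
def pvHl (x : Char) : List Char := "\x1b[44;33m".toList ++ [x] ++ "\x1b[m".toList

-- for i, x in enumerate(mystring): text_highlight += (highlighted x if i == pos else x)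
def highlight_position_py (pos : Int) (mystring : String) : String :=
  String.ofList <|
    (PySem.List.enumerate mystring.toList 0).foldl
      (fun acc p => acc ++ (if p.1 = pos then pvHl p.2 else [p.2])) []

-- ===== PORT B =====
-- if 0 <= pos < len(mystring): return mystring[:pos] + f"...{mystring[pos]}..." + mystring[pos+1:]  else mystring
def highlight_position_py_alt (pos : Int) (mystring : String) : String :=
  let cs := mystring.toList
  if 0 ≤ pos ∧ pos < (cs.length : Int) then
    String.ofList (PySem.List.slice cs none (some pos) ++
      ("\x1b[44;33m".toList ++ [PySem.List.pyGetD cs pos ' '] ++ "\x1b[m".toList) ++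
      PySem.List.slice cs (some (pos + 1)) none)
  else mystring

-- ===== PRECONDITION & SPEC =====
def Spec_highlight_position_py (pos : Int) (mystring : String) (out : String) : Prop := out = highlight_position_py_alt pos mystring
instance (pos : Int) (mystring : String) (out : String) : Decidable (Spec_highlight_position_py pos mystring out) := by unfold Spec_highlight_position_py; infer_instance

-- ===== CLAIM (what is proved, stated in full; the proofs are below) =====
def Claim_equal_highlight_position_py : Prop := ∀ (pos : Int) (mystring : String), Dom_highlight_position_py pos mystring → Spec_highlight_position_py pos mystring (highlight_position_py pos mystring)

-- ===== LEMMAS AND PROOFS =====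

-- A's loop, flattened: no index equals pos ⇒ the string is rebuilt unchanged
theorem pv_flat_noHit (pos : Int) (cs : List Char) (s : Int)
    (h : pos < s ∨ (s + cs.length : Int) ≤ pos) :
    (PySem.List.enumerate cs s).flatMap
      (fun p => if p.1 = pos then pvHl p.2 else [p.2]) = cs := by
  induction cs generalizing s with
  | nil => simp [PySem.List.enumerate_nil]
  | cons c cs ih =>
    rw [PySem.List.enumerate_cons]
    have hne : ¬ s = pos := by
      rcases h with h | h
      · omega
      · simp at h; omega
    simp only [List.flatMap_cons, if_neg hne]
    rw [ih (s + 1) (by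
      rcases h with h | h
      · left; omega
      · right; simp at h ⊢; omega)]
    simp

-- A's loop, flattened: pos hit inside the list ⇒ take / highlighted char / drop
theorem pv_flat_hit (pos : Int) (cs : List Char) (s : Int)
    (h1 : s ≤ pos) (h2 : pos < s + cs.length) :
    (PySem.List.enumerate cs s).flatMap
      (fun p => if p.1 = pos then pvHl p.2 else [p.2]) =
    cs.take (pos - s).toNat ++ pvHl (cs.getD (pos - s).toNat ' ') ++
      cs.drop ((pos - s).toNat + 1) := by
  induction cs generalizing s with
  | nil => simp at h2; omega
  | cons c cs ih =>
    rw [PySem.List.enumerate_cons]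
    by_cases hs : s = pos
    · have : (pos - s).toNat = 0 := by omega
      simp only [List.flatMap_cons, if_pos hs, this]
      rw [pv_flat_noHit pos cs (s + 1) (by left; omega)]
      simp
    · have hk : (pos - s).toNat = (pos - (s + 1)).toNat + 1 := by omega
      simp only [List.flatMap_cons, if_neg hs]
      rw [ih (s + 1) (by omega) (by simp at h2 ⊢; omega)]
      simp [hk]

-- the foldl with '++' is the flatMap
theorem pv_foldl_flat (pos : Int) (l : List (Int × Char)) (acc : List Char) :
    l.foldl (fun acc p => acc ++ (if p.1 = pos then pvHl p.2 else [p.2])) acc =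
      acc ++ l.flatMap (fun p => if p.1 = pos then pvHl p.2 else [p.2]) := by
  induction l generalizing acc with
  | nil => simp
  | cons x l ih => simp [List.foldl_cons, ih]

-- ===== VERDICT (by name: the statement is the Claim_ definition above) =====
theorem highlight_position_py_spec : Claim_equal_highlight_position_py := by
  intro pos mystring _
  unfold Spec_highlight_position_py highlight_position_py highlight_position_py_alt
  rw [pv_foldl_flat]
  by_cases h : 0 ≤ pos ∧ pos < (mystring.toList.length : Int)
  · rw [if_pos h]
    rw [pv_flat_hit pos mystring.toList 0 h.1 (by simpa using h.2)]
    have hlen : pos < (mystring.toList.length : Int) := h.2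
    have hget : PySem.List.pyGetD mystring.toList pos ' ' =
        mystring.toList.getD (pos - 0).toNat ' ' := by
      rw [PySem.List.pyGetD_eq_getElem _ _ h.1 hlen]
      rw [List.getD_eq_getElem _ _ (by omega)]
      simp
    rw [PySem.List.slice_to _ h.1, PySem.List.slice_from _ (by omega : (0:Int) ≤ pos + 1)]
    rw [hget]
    have : (pos + 1).toNat = (pos - 0).toNat + 1 := by omega
    simp [this, pvHl]
  · rw [if_neg h]
    rw [pv_flat_noHit pos mystring.toList 0 (by
      rcases lt_or_ge pos 0 with hl | hl
      · left; exact hl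
      · right
        by_contra hc
        exact h ⟨hl, by simp at hc ⊢; omega⟩)]
    simp
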